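-- pv_equiv track=rewrite | github.com/deekshalakhera123/ADB-Creation-Code | run.py | _br_metric_key
-- ===== SOURCE A (Python) =====
-- _BR_METRIC_ORDER = [
--     "_sold_igr",
--     "_total_agreement_price",
--     "_avg_agreement_price",
--     "_ca_consumed_sqft_igr",
--     "_wt_avg_rate_nca",
--     "_p50_rate_nca",
--     "_p75_rate_nca",
--     "_p90_rate_nca",
--     "_wt_avg_rate_sa",
--     "_p50_rate_sa",
--     "_p75_rate_sa",
--     "_p90_rate_sa",
--     "_floor_wise_90p_rate",
--     "_most_prevailing_rate_range",
--     "_total_unit_sold_in_rate_range",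
--     "_total_unit_sold_in_area_range",
--     "_total_agreement_price_in_area_range",
--     "_avg_agreement_price_in_area_range",
--     "_total_ca_consumed_in_area_range_sqft",
--     "_avg_carpet_area_in_sqft",
--     "_agreement_price_range_unit_sold",
--     "_agreement_price_range_total_sales",
--     "_agreement_price_range_ca_consumed_sqft",
--     "_rate_range_unit_sold",
--     "_rate_range_total_sales",
--     "_rate_range_ca_consumed_sqft",
--     "_age_range_unit_sold",
--     "_age_range_total_agreement_price",
--     "_age_range_ca_consumed_sqft",
-- ]
--
-- _BR_SUFFIXES_SORTED = sorted(_BR_METRIC_ORDER, key=len, reverse=True)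
--
-- def _br_metric_key(col: str) -> int:
--     """Sort key for metric within a br prefix."""
--     for sfx in _BR_SUFFIXES_SORTED:
--         if col.endswith(sfx):
--             try:
--                 return _BR_METRIC_ORDER.index(sfx)
--             except ValueError:
--                 return 999
--     return 999
-- ===== SOURCE B (Python) =====
-- _BR_METRIC_ORDER = [
--     "_sold_igr",
--     "_total_agreement_price",
--     "_avg_agreement_price",
--     "_ca_consumed_sqft_igr",
--     "_wt_avg_rate_nca",
--     "_p50_rate_nca",
--     "_p75_rate_nca",
--     "_p90_rate_nca",
--     "_wt_avg_rate_sa",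
--     "_p50_rate_sa",
--     "_p75_rate_sa",
--     "_p90_rate_sa",
--     "_floor_wise_90p_rate",
--     "_most_prevailing_rate_range",
--     "_total_unit_sold_in_rate_range",
--     "_total_unit_sold_in_area_range",
--     "_total_agreement_price_in_area_range",
--     "_avg_agreement_price_in_area_range",
--     "_total_ca_consumed_in_area_range_sqft",
--     "_avg_carpet_area_in_sqft",
--     "_agreement_price_range_unit_sold",
--     "_agreement_price_range_total_sales",
--     "_agreement_price_range_ca_consumed_sqft",
--     "_rate_range_unit_sold",
--     "_rate_range_total_sales",
--     "_rate_range_ca_consumed_sqft",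
--     "_age_range_unit_sold",
--     "_age_range_total_agreement_price",
--     "_age_range_ca_consumed_sqft",
-- ]
--
--
-- def _br_metric_key(col: str) -> int:
--     """Sort key for metric within a br prefix."""
--     matches = [sfx for sfx in _BR_METRIC_ORDER if col.endswith(sfx)]
--     if not matches:
--         return 999
--     # Two distinct suffixes of equal length can never both match, so the
--     # longest match is unique and max(key=len) picks exactly it.
--     return _BR_METRIC_ORDER.index(max(matches, key=len))
-- ===== Notes on version B (the rewrite author's own statement) =====
-- stated objective: simpler
-- what changed: Drops the pre-sorted longest-first suffix list and its try/except: B filters the original order list for matching suffixes and returns the index of the longest match via max(key=len), correct because two distinct equal-length suffixes cannot both match.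
import Mathlib
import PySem

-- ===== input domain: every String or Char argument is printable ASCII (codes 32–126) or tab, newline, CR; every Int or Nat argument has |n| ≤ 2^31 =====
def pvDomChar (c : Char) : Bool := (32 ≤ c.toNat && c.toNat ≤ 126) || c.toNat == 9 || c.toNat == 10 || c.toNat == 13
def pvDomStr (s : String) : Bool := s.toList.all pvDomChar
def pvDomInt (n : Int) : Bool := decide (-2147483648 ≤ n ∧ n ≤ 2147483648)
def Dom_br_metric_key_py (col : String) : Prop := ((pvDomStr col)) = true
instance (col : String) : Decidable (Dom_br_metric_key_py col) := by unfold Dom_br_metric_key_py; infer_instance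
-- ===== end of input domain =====

-- B drops the pre-sorted suffix list and the try/except: it filters the original
-- order list and returns the index of the longest matching suffix (simpler, same cost).

-- ===== PORT A =====
def brMetricOrder : List String := [
  "_sold_igr",
  "_total_agreement_price",
  "_avg_agreement_price",
  "_ca_consumed_sqft_igr",
  "_wt_avg_rate_nca",
  "_p50_rate_nca",
  "_p75_rate_nca",
  "_p90_rate_nca",
  "_wt_avg_rate_sa",
  "_p50_rate_sa",
  "_p75_rate_sa",
  "_p90_rate_sa",
  "_floor_wise_90p_rate",
  "_most_prevailing_rate_range",
  "_total_unit_sold_in_rate_range",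
  "_total_unit_sold_in_area_range",
  "_total_agreement_price_in_area_range",
  "_avg_agreement_price_in_area_range",
  "_total_ca_consumed_in_area_range_sqft",
  "_avg_carpet_area_in_sqft",
  "_agreement_price_range_unit_sold",
  "_agreement_price_range_total_sales",
  "_agreement_price_range_ca_consumed_sqft",
  "_rate_range_unit_sold",
  "_rate_range_total_sales",
  "_rate_range_ca_consumed_sqft",
  "_age_range_unit_sold",
  "_age_range_total_agreement_price",
  "_age_range_ca_consumed_sqft"]

-- _BR_SUFFIXES_SORTED = sorted(_BR_METRIC_ORDER, key=len, reverse=True)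
def brSuffixesSorted : List String := PySem.List.sorted brMetricOrder PySem.Str.len true

-- the for-loop with early return = find?; .index inside try/except = index? with 999 on none
def br_metric_key_py (col : String) : Int :=
  match brSuffixesSorted.find? (fun sfx => PySem.Str.endswith col sfx) with
  | some sfx =>
      match PySem.List.index? brMetricOrder sfx with
      | some i => (i : Int)
      | none => 999
  | none => 999

-- ===== PORT B =====
def br_metric_key_py_alt (col : String) : Int :=
  -- matches = [sfx for sfx in _BR_METRIC_ORDER if col.endswith(sfx)] (inlined binding)
  match PySem.List.max? (brMetricOrder.filter (fun sfx => PySem.Str.endswith col sfx)) PySem.Str.len with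
  | none => 999
  | some m => (((PySem.List.index? brMetricOrder m).getD 0 : Nat) : Int)
      -- .index never raises in B: m comes from a filter of brMetricOrder, so getD's default is unreachable

-- ===== PRECONDITION & SPEC =====
def Spec_br_metric_key_py (col : String) (out : Int) : Prop := out = br_metric_key_py_alt col
instance (col : String) (out : Int) : Decidable (Spec_br_metric_key_py col out) := by unfold Spec_br_metric_key_py; infer_instance

-- ===== CLAIM (what is proved, stated in full; the proofs are below) =====
def Claim_equal_br_metric_key_py : Prop := ∀ (col : String), Dom_br_metric_key_py col → Spec_br_metric_key_py col (br_metric_key_py col)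

-- ===== LEMMAS AND PROOFS =====

-- two suffixes of the same string with equal length are equal
theorem pv_endswith_len_eq (col s t : String)
    (hs : PySem.Str.endswith col s = true) (ht : PySem.Str.endswith col t = true)
    (hl : PySem.Str.len s = PySem.Str.len t) : s = t := by
  rw [PySem.Str.endswith_eq, PySem.Chars.endswith_iff] at hs ht
  obtain ⟨p, hp⟩ := hs
  obtain ⟨q, hq⟩ := ht
  have hlen : s.toList.length = t.toList.length := by
    have h1 := PySem.Chars.len_eq s.toList
    have h2 := PySem.Chars.len_eq t.toList
    -- PySem.Str.len is the length of toList as an Int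
    have : (s.toList.length : Int) = (t.toList.length : Int) := by
      simpa [PySem.Str.len] using hl
    exact_mod_cast this
  have := (List.append_inj' (hp.trans hq.symm) hlen).2
  exact String.ext (by simpa [String.toList] using this)

-- the first match in a key-descending list has maximal key among all matches
theorem pv_find_desc_max {α : Type} (key : α → Int) (P : α → Bool) :
    ∀ (ys : List α), ys.Pairwise (fun a b => key b ≤ key a) → ∀ u, ys.find? P = some u →
      P u = true ∧ u ∈ ys ∧ ∀ v ∈ ys, P v = true → key v ≤ key u := by
  intro ys
  induction ys with
  | nil => intro _ u h; simp [List.find?] at h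
  | cons y t ih =>
    intro hp u h
    rw [List.pairwise_cons] at hp
    by_cases hy : P y = true
    · rw [List.find?_cons_of_pos hy] at h
      cases h
      refine ⟨hy, List.mem_cons_self, ?_⟩
      intro v hv _
      rcases List.mem_cons.mp hv with rfl | hv
      · exact le_refl _
      · exact hp.1 v hv
    · rw [List.find?_cons_of_neg (by simpa using hy)] at h
      obtain ⟨h1, h2, h3⟩ := ih hp.2 u h
      refine ⟨h1, List.mem_cons_of_mem _ h2, ?_⟩
      intro v hv hvP
      rcases List.mem_cons.mp hv with rfl | hv
      · exact absurd hvP hy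
      · exact h3 v hv hvP

-- ===== VERDICT (by name: the statement is the Claim_ definition above) =====
theorem br_metric_key_py_spec : Claim_equal_br_metric_key_py := by
  intro col _
  unfold Spec_br_metric_key_py br_metric_key_py br_metric_key_py_alt
  set P : String → Bool := fun sfx => PySem.Str.endswith col sfx with hP
  have hpair : brSuffixesSorted.Pairwise (fun a b => PySem.Str.len b ≤ PySem.Str.len a) :=
    PySem.List.sorted_pairwise_rev brMetricOrder PySem.Str.len
  cases hA : brSuffixesSorted.find? P with
  | none =>
    cases hB : PySem.List.max? (brMetricOrder.filter P) PySem.Str.len with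
    | none => rfl
    | some m =>
      exfalso
      have hm := PySem.List.max?_mem hB
      have hmem : m ∈ brMetricOrder := (List.mem_filter.mp hm).1
      have hPm : P m = true := (List.mem_filter.mp hm).2
      have : m ∈ brSuffixesSorted :=
        (PySem.List.mem_sorted brMetricOrder PySem.Str.len true m).mpr hmem
      have := List.find?_eq_none.mp hA m this
      exact this hPm
  | some u =>
    obtain ⟨hPu, huMem, hmax⟩ := pv_find_desc_max PySem.Str.len P brSuffixesSorted hpair u hA
    have huOrder : u ∈ brMetricOrder :=
      (PySem.List.mem_sorted brMetricOrder PySem.Str.len true u).mp huMem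
    cases hB : PySem.List.max? (brMetricOrder.filter P) PySem.Str.len with
    | none =>
      exfalso
      have : brMetricOrder.filter P = [] :=
        (PySem.List.max?_eq_none_iff _ _).mp hB
      have : u ∈ brMetricOrder.filter P := List.mem_filter.mpr ⟨huOrder, hPu⟩
      simp_all
    | some m =>
      have hm := PySem.List.max?_mem hB
      have hmOrder : m ∈ brMetricOrder := (List.mem_filter.mp hm).1
      have hPm : P m = true := (List.mem_filter.mp hm).2
      have hum : u = m := by
        apply pv_endswith_len_eq col u m hPu hPm
        have h1 : PySem.Str.len u ≤ PySem.Str.len m :=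
          PySem.List.max?_isMax hB u (List.mem_filter.mpr ⟨huOrder, hPu⟩)
        have h2 : PySem.Str.len m ≤ PySem.Str.len u :=
          hmax m ((PySem.List.mem_sorted brMetricOrder PySem.Str.len true m).mpr hmOrder) hPm
        omega
      subst hum
      have : (PySem.List.index? brMetricOrder u).isSome = true :=
        (PySem.List.index?_isSome_iff brMetricOrder u).mpr huOrder
      obtain ⟨i, hi⟩ := Option.isSome_iff_exists.mp this
      simp only [PySem.List.index?_eq_idxOf?] at hi
      simp [hi]
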